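-- pv_equiv track=rewrite | github.com/shawwn/npnd | src/npnd/_src/ops/shape.py | flat_inner_shape
-- ===== SOURCE A (Python) =====
-- from typing import NamedTuple, Sequence, Tuple, List, Optional
--
-- Shape = Sequence[int]
--
-- def flat_inner_shape(shape: Shape, num_out_dims = 2) -> Shape:
--   assert num_out_dims > 0
--   out_dims = [0 for i in range(num_out_dims)]
--   offset = len(shape) - num_out_dims
--   for out_dim in reversed(range(num_out_dims)):
--     in_dim = out_dim + offset
--     out_dims[out_dim] = 1 if in_dim < 0 else shape[in_dim]
--   for in_dim in range(offset):
--     out_dims[0] *= shape[in_dim]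
--   return tuple(out_dims)
-- ===== SOURCE B (Python) =====
-- def flat_inner_shape(shape, num_out_dims=2):
--   assert num_out_dims > 0
--   # peel the last dimension off num_out_dims-1 times (counting a pad 1 when empty),
--   # then collapse whatever is left into the head product
--   rest = list(shape)
--   tail = []
--   pad = 0
--   for _ in range(num_out_dims - 1):
--     if rest:
--       tail.append(rest.pop())
--     else:
--       pad += 1
--   p = 1
--   for d in rest:
--     p *= d
--   return (1,) * pad + (p,) + tuple(reversed(tail))
-- ===== Notes on version B (the rewrite author's own statement) =====
-- stated objective: alternative
-- what changed: Instead of A's two forward index loops writing into a pre-allocated zero list with a 1-if-negative sentinel, B peels the last dimension off the shape with pop() num_out_dims-1 times (counting leading 1-pads when the shape runs out), collapses the remainder into the head product, and assembles the result back-to-front from pad + head + reversed tail.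
import Mathlib
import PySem

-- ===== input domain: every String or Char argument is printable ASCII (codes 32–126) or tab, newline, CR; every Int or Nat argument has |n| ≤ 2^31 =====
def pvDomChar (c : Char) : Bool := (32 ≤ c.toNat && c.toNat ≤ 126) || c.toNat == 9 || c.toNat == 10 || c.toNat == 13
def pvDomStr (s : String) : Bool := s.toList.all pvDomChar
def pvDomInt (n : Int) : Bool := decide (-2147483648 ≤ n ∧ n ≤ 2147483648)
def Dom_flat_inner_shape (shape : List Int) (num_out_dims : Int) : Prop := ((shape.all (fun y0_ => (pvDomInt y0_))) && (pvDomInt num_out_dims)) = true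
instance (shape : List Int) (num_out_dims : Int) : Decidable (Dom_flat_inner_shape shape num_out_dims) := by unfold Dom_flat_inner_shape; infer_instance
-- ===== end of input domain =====

-- B replaces A's pre-allocated zero list and two index loops by structural recursion on
-- num_out_dims, peeling the last dimension (or padding a leading 1) at each step (alternative decomposition).


-- ===== PORT A =====
def flat_inner_shape (shape : List Int) (num_out_dims : Int) : List Int :=
  -- assert num_out_dims > 0  (excluded by Pre_)
  let out_dims0 := (PySem.List.pyRange 0 num_out_dims 1).map (fun _ => (0 : Int))
  let offset : Int := (shape.length : Int) - num_out_dims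
  let out_dims1 := (PySem.List.pyRange 0 num_out_dims 1).reverse.foldl
    (fun od out_dim =>
      let in_dim := out_dim + offset
      od.set out_dim.toNat (if in_dim < 0 then 1 else PySem.List.pyGetD shape in_dim 0))
    out_dims0
  (PySem.List.pyRange 0 offset 1).foldl
    (fun od in_dim => od.set 0 (od.getD 0 0 * PySem.List.pyGetD shape in_dim 0))
    out_dims1

-- ===== PORT B =====
def flat_inner_shape_alt (shape : List Int) (num_out_dims : Int) : List Int :=
  -- assert num_out_dims > 0  (excluded by Pre_)
  -- state (rest, tail, pad); 'if rest:' is the nonemptiness test; rest.pop() peels the last element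
  let s := (PySem.List.pyRange 0 (num_out_dims - 1) 1).foldl
    (fun (s : List Int × List Int × Int) _ =>
      if s.1 ≠ [] then (s.1.dropLast, s.2.1 ++ [s.1.getLastD 0], s.2.2)
      else (s.1, s.2.1, s.2.2 + 1))
    (shape, [], 0)
  let p := s.1.foldl (fun p d => p * d) 1
  List.replicate s.2.2.toNat 1 ++ p :: s.2.1.reverse

-- ===== PRECONDITION & SPEC =====
-- Python A asserts num_out_dims > 0 and raises AssertionError otherwise; Pre_ excludes exactly that.
def Pre_flat_inner_shape (shape : List Int) (num_out_dims : Int) : Prop := 0 < num_out_dims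
instance (shape : List Int) (num_out_dims : Int) : Decidable (Pre_flat_inner_shape shape num_out_dims) := by unfold Pre_flat_inner_shape; infer_instance
def pvWitness_flat_inner_shape : List Int × Int := ([2, 3, 4], 2)

def Spec_flat_inner_shape (shape : List Int) (num_out_dims : Int) (out : List Int) : Prop := out = flat_inner_shape_alt shape num_out_dims
instance (shape : List Int) (num_out_dims : Int) (out : List Int) : Decidable (Spec_flat_inner_shape shape num_out_dims out) := by unfold Spec_flat_inner_shape; infer_instance

-- ===== CLAIM (what is proved, stated in full; the proofs are below) =====
def Claim_equal_flat_inner_shape : Prop := ∀ (shape : List Int) (num_out_dims : Int), Dom_flat_inner_shape shape num_out_dims → Pre_flat_inner_shape shape num_out_dims → Spec_flat_inner_shape shape num_out_dims (flat_inner_shape shape num_out_dims)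

-- ===== LEMMAS AND PROOFS =====

-- closed-form characterisation both ports are proved equal to (proof-only helper)
def pvForm (shape : List Int) (M : Nat) : List Int :=
  if (M : Int) ≤ (shape.length : Int) then
    let k := ((shape.length : Int) - (M : Int) + 1).toNat
    ((shape.take k).foldl (· * ·) 1) :: shape.drop k
  else
    List.replicate ((M : Int) - (shape.length : Int)).toNat 1 ++ shape

-- A's first loop: writing f i into slot i for i = m-1, …, 0 fills the first m slots with map f.
theorem pv_set_loop (f : Int → Int) :
    ∀ (m : Nat) (od : List Int), m ≤ od.length →
      ((PySem.List.pyRange 0 (m : Int) 1).reverse.foldl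
        (fun od i => od.set i.toNat (f i)) od)
      = (PySem.List.pyRange 0 (m : Int) 1).map f ++ od.drop m := by
  intro m
  induction m with
  | zero => intro od _; simp [PySem.List.pyRange_one_eq_nil]
  | succ m ih =>
    intro od hlen
    have hsplit : PySem.List.pyRange 0 ((m + 1 : Nat) : Int) 1
        = PySem.List.pyRange 0 (m : Int) 1 ++ [(m : Int)] := by
      have := PySem.List.pyRange_one_succ_right (a := 0) (b := (m : Int)) (by omega)
      push_cast
      simpa using this
    rw [hsplit]
    simp only [List.reverse_append, List.reverse_singleton, List.singleton_append,
      List.foldl_cons, List.map_append, List.map_singleton]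
    have hmlt : m < od.length := by omega
    rw [ih (od.set ((m : Int)).toNat (f (m : Int))) (by simp; omega)]
    have htoNat : ((m : Int)).toNat = m := by omega
    rw [htoNat, List.drop_set, if_neg (lt_irrefl m), Nat.sub_self,
        List.drop_eq_getElem_cons hmlt, List.set_cons_zero]
    simp

-- A's second loop only ever rewrites slot 0 of a nonempty list.
theorem pv_head_loop (g : Int → Int) :
    ∀ (r : List Int) (h : Int) (t : List Int),
      r.foldl (fun od i => od.set 0 (od.getD 0 0 * g i)) (h :: t)
      = (r.foldl (fun acc i => acc * g i) h) :: t := by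
  intro r
  induction r with
  | nil => intro h t; simp
  | cons a r ih =>
    intro h t
    have hstep : ((h :: t).set 0 ((h :: t).getD 0 0 * g a)) = (h * g a) :: t := by simp
    rw [List.foldl_cons, List.foldl_cons, hstep, ih]

-- fold of (·*·) over Int commutes with its initial value
theorem pv_foldl_mul (l : List Int) : ∀ (a : Int), l.foldl (· * ·) a = a * l.foldl (· * ·) 1 := by
  induction l with
  | nil => intro a; simp
  | cons x l ih =>
    intro a
    simp only [List.foldl_cons]
    rw [ih (a * x), ih (1 * x)]
    ring

-- A equals the closed form
theorem pvA_eq_form (shape : List Int) (M : Nat) (hM0 : 0 < M) :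
    flat_inner_shape shape (M : Int) = pvForm shape M := by
  simp only [flat_inner_shape, pvForm]
  set offset : Int := (shape.length : Int) - (M : Int) with hoffset
  have hfill := pv_set_loop
    (fun i => if i + offset < 0 then 1 else PySem.List.pyGetD shape (i + offset) 0)
    M ((PySem.List.pyRange 0 (M : Int) 1).map (fun _ => (0 : Int)))
    (by rw [List.length_map, PySem.List.length_pyRange_one]; omega)
  have hdrop0 : ((PySem.List.pyRange 0 (M : Int) 1).map (fun _ => (0 : Int))).drop M = [] := by
    apply List.drop_eq_nil_of_le
    rw [List.length_map, PySem.List.length_pyRange_one]; omega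
  rw [hdrop0, List.append_nil] at hfill
  rw [hfill]
  by_cases hcase : (M : Int) ≤ (shape.length : Int)
  · rw [if_pos hcase]
    have hoff0 : 0 ≤ offset := by omega
    have hofflt : offset.toNat < shape.length := by omega
    have hmap : (PySem.List.pyRange 0 (M : Int) 1).map
        (fun i => if i + offset < 0 then 1 else PySem.List.pyGetD shape (i + offset) 0)
        = shape.drop offset.toNat := by
      apply List.ext_getElem
      · simp [PySem.List.length_pyRange_one]; omega
      · intro k hk1 hk2
        have hkM : k < M := by
          simpa [PySem.List.length_pyRange_one] using hk1
        rw [List.getElem_map, PySem.List.getElem_pyRange_one]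
        have hge : ¬ ((0 : Int) + k + offset < 0) := by omega
        rw [if_neg hge]
        rw [PySem.List.pyGetD_eq_getElem _ _ (by omega) (by omega)]
        rw [List.getElem_drop]
        congr 1
        omega
    rw [hmap]
    have hcons : shape.drop offset.toNat
        = shape[offset.toNat] :: shape.drop (offset.toNat + 1) :=
      List.drop_eq_getElem_cons hofflt
    rw [hcons, pv_head_loop]
    have hk : ((shape.length : Int) - (M : Int) + 1).toNat = offset.toNat + 1 := by omega
    rw [hk]
    congr 1
    have htake : shape.take (offset.toNat + 1)
        = shape.take offset.toNat ++ [shape[offset.toNat]] := by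
      rw [List.take_add_one]
      simp [List.getElem?_eq_getElem hofflt]
    rw [htake, List.foldl_append]
    simp only [List.foldl_cons, List.foldl_nil]
    have hcongr : (PySem.List.pyRange 0 offset 1).foldl
          (fun acc i => acc * PySem.List.pyGetD shape i 0) shape[offset.toNat]
        = (PySem.List.pyRange 0 ((shape.take offset.toNat).length : Int) 1).foldl
          (fun acc i => acc * PySem.List.pyGetD (shape.take offset.toNat) i 0) shape[offset.toNat] := by
      have hlen : ((shape.take offset.toNat).length : Int) = offset := by
        simp [List.length_take]; omega
      rw [hlen]
      apply PySem.List.foldl_congr_mem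
      intro acc x hx
      have hx' := (PySem.List.mem_pyRange_one).1 hx
      congr 1
      rw [PySem.List.pyGetD_eq_getElem shape _ (by omega) (by omega)]
      rw [PySem.List.pyGetD_eq_getElem (shape.take offset.toNat) _ (by omega) (by rw [hlen]; omega)]
      rw [List.getElem_take]
    rw [hcongr, PySem.List.foldl_pyRange_zero_pyGetD']
    rw [pv_foldl_mul]
    ring
  · rw [if_neg hcase]
    rw [PySem.List.pyRange_one_eq_nil (a := 0) (b := offset) (by omega), List.foldl_nil]
    apply List.ext_getElem
    · simp [PySem.List.length_pyRange_one]; omega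
    · intro k hk1 hk2
      have hkM : k < M := by
        simpa [PySem.List.length_pyRange_one] using hk1
      rw [List.getElem_map, PySem.List.getElem_pyRange_one]
      have hpad : ((M : Int) - (shape.length : Int)).toNat = M - shape.length := by omega
      by_cases hlt : ((0 : Int) + k + offset < 0)
      · rw [if_pos hlt]
        rw [List.getElem_append_left (by simp [hpad]; omega)]
        simp
      · rw [if_neg hlt]
        rw [PySem.List.pyGetD_eq_getElem _ _ (by omega) (by omega)]
        rw [List.getElem_append_right (by simp [hpad]; omega)]
        congr 1
        simp [hpad]
        omega

-- B's peel loop equals the closed form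
-- the loop body of B's port, named for the proofs
def pvStep (s : List Int × List Int × Int) : List Int × List Int × Int :=
  if s.1 ≠ [] then (s.1.dropLast, s.2.1 ++ [s.1.getLastD 0], s.2.2)
  else (s.1, s.2.1, s.2.2 + 1)

theorem pv_foldl_const {α β : Type} (g : α → α) :
    ∀ (l : List β) (s : α), l.foldl (fun s _ => g s) s = g^[l.length] s := by
  intro l
  induction l with
  | nil => intro s; simp
  | cons x l ih => intro s; simp [List.foldl_cons, ih, Function.iterate_succ_apply]

theorem pv_getLastD_take (shape : List Int) (m : Nat) (h1 : 1 ≤ m) (h2 : m ≤ shape.length) :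
    (shape.take m).getLastD 0 = shape[m - 1]'(by omega) := by
  have hlen : (shape.take m).length = m := by simp [List.length_take]; omega
  have hne : shape.take m ≠ [] := by
    intro h; rw [h] at hlen; simp at hlen; omega
  rw [List.getLastD_eq_getLast?, List.getLast?_eq_some_getLast hne, Option.getD_some,
    List.getLast_eq_getElem]
  simp only [hlen]
  rw [List.getElem_take]

theorem pvIter (shape : List Int) : ∀ (T : Nat),
    pvStep^[T] (shape, ([], (0 : Int))) =
      if T ≤ shape.length then
        (shape.take (shape.length - T), ((shape.drop (shape.length - T)).reverse, (0 : Int)))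
      else ([], (shape.reverse, (T : Int) - (shape.length : Int))) := by
  intro T
  induction T with
  | zero => simp
  | succ T ih =>
    rw [Function.iterate_succ_apply', ih]
    by_cases h1 : T + 1 ≤ shape.length
    · -- rest = take (n - T) is nonempty; peel its last element
      rw [if_pos (by omega), if_pos h1]
      have hm1 : 1 ≤ shape.length - T := by omega
      have hlen : (shape.take (shape.length - T)).length = shape.length - T := by
        rw [List.length_take]; omega
      have hne : shape.take (shape.length - T) ≠ [] := by
        intro h; rw [h] at hlen; simp at hlen; omega
      have hA : (shape.take (shape.length - T)).dropLast
          = shape.take (shape.length - (T + 1)) := by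
        rw [List.dropLast_eq_take, hlen, List.take_take]
        congr 1
        omega
      have hB : (shape.drop (shape.length - T)).reverse
            ++ [(shape.take (shape.length - T)).getLastD 0]
          = (shape.drop (shape.length - (T + 1))).reverse := by
        rw [pv_getLastD_take shape (shape.length - T) hm1 (by omega)]
        have hidx : shape.length - T - 1 < shape.length := by omega
        have hdrop : shape.drop (shape.length - (T + 1))
            = shape[shape.length - T - 1]'hidx :: shape.drop (shape.length - T - 1 + 1) := by
          rw [show shape.length - (T + 1) = shape.length - T - 1 by omega]
          exact List.drop_eq_getElem_cons hidx
        rw [hdrop, List.reverse_cons, show shape.length - T - 1 + 1 = shape.length - T by omega]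
      simp only [pvStep, if_pos hne, hA, hB]
    · by_cases h2 : T ≤ shape.length
      · -- T = shape.length exactly: rest just became empty, first pad
        have hT : T = shape.length := by omega
        rw [if_pos h2, if_neg h1]
        have htake : shape.take (shape.length - T) = [] := by simp [hT]
        simp only [pvStep, htake]
        simp [hT]
      · -- already empty: pad again
        rw [if_neg h2, if_neg h1]
        simp only [pvStep]
        simp
        ring

theorem pvB_eq_form (shape : List Int) (M : Nat) (hM0 : 0 < M) :
    flat_inner_shape_alt shape (M : Int) = pvForm shape M := by
  simp only [flat_inner_shape_alt]
  have hbody : (fun (s : List Int × List Int × Int) (_ : Int) =>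
      if s.1 ≠ [] then (s.1.dropLast, s.2.1 ++ [s.1.getLastD 0], s.2.2)
      else (s.1, s.2.1, s.2.2 + 1)) = (fun s _ => pvStep s) := rfl
  rw [hbody, pv_foldl_const pvStep, PySem.List.length_pyRange_one, show ((M : Int) - 1 - 0).toNat = M - 1 by omega,
    pvIter shape (M - 1)]
  by_cases hc : M - 1 ≤ shape.length
  · rw [if_pos hc]
    by_cases hMn : (M : Int) ≤ (shape.length : Int)
    · -- common case: head product of the leading slice, trailing dims copied
      have hk : ((shape.length : Int) - (M : Int) + 1).toNat = shape.length - (M - 1) := by omega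
      simp only [pvForm]
      rw [if_pos hMn, hk]
      simp
    · -- M = shape.length + 1: everything peeled, head product is 1
      have hMeq : M - 1 = shape.length := by omega
      have htake : shape.take (shape.length - (M - 1)) = [] := by simp [hMeq]
      have hdrop : shape.drop (shape.length - (M - 1)) = shape := by simp [hMeq]
      simp only [pvForm]
      rw [if_neg hMn, htake, hdrop, show ((M : Int) - (shape.length : Int)).toNat = 1 by omega]
      simp
  · -- shape shorter: pads then head 1 then the whole shape
    rw [if_neg hc]
    have hMn : ¬ ((M : Int) ≤ (shape.length : Int)) := by omega
    simp only [pvForm]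
    rw [if_neg hMn,
      show (((M - 1 : Nat) : Int) - (shape.length : Int)).toNat = M - 1 - shape.length by omega,
      show ((M : Int) - (shape.length : Int)).toNat = (M - 1 - shape.length) + 1 by omega,
      List.replicate_succ']
    simp

theorem flat_inner_shape_spec : Claim_equal_flat_inner_shape := by
  unfold Claim_equal_flat_inner_shape
  intro shape num _ hpre
  unfold Pre_flat_inner_shape at hpre
  obtain ⟨M, rfl⟩ : ∃ M : Nat, num = (M : Int) := ⟨num.toNat, by omega⟩
  have hM0 : 0 < M := by exact_mod_cast hpre
  unfold Spec_flat_inner_shape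
  rw [pvA_eq_form shape M hM0, pvB_eq_form shape M hM0]
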